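/-
  SEGMENT 7 OF `inverse_mdct`, SPLIT IN TWO at the label `Vorbis.L.inverse_mdct.cut19` (0x109963, the return address of the call of
  imdct_step3_inner_s_loop_ld654, stb_vorbis_fixed.c:2811 `uint16 *bitrev = f->bit_reverse[blocktype]`).

      inverse_mdct.Frame7        what the cut points inside segment 7 share: `Body` + the slots of FRAME0 that the two loops of the
                                 nest and the ld654 call leave alone
      inverse_mdct.AtCut19       the assertion at `cut19`: `Frame7` and `r15 = u`
      inverse_mdct.Seg7a         loop7 (0x1098f2) → cut19: the second `l` loop with its inner `r` loop (imdct_step3_inner_s_loop per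
                                 `(l, r)`), then the call of imdct_step3_inner_s_loop_ld654; NO check site
      inverse_mdct.Seg7b         cut19 → loop8 (0x109adb): 17 instructions 0x109963 … 0x1099b4, the load of `f->bit_reverse[bt]` with its
                                 one check (0x10997a, __asan_load8_noabort of `f + 1464 + 8·bt`), the step-4-5-6 set-up (three qword stores)
      inverse_mdct.Seg7.of_parts Seg7a → Seg7b → Seg7   (the claim `Seg7` of Vorbis/Spec/MdctTop.lean is unchanged)

  The slots, as in Vorbis/Spec/MdctTop.lean: `rbp = (entry rsp) − 8`, so `[rbp − X]` is `[ue.rsp − (X + 8)]`.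
-/
import Vorbis.Spec.MdctTop
import Vorbis.Spec.MdctUse
namespace Vorbis.Spec
open X86 X86.User Asan

namespace inverse_mdct

/-- **What every cut point inside segment 7 shares** (`loop7`, `loop6`, `cut19`): the function's `Body` and the slots of FRAME0 that
segment 7 reads and does not overwrite before its last block (0x109963 …): `q[rbp−38H] = u`, `d[rbp−44H] = n`, `q[rbp−A8H] = &u[n2]`
(`SlotsBuf`), `q[rbp−40H] = A`, `q[rbp−88H] = 4·n2`, `q[rbp−98H] = 4·n2 − 32`, `q[rbp−A0H] = 4·n4` (`SlotsS2`), `d[rbp−60H] = ld + 1`,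
`d[rbp−50H] = n2 − 1` (`SlotsStep3`), `d[rbp−80H] = n >> 5`. It is `At7` without `rip`, without the register `edi`, and with the two
slots of `SlotsA` that survive: the `l` body overwrites `d[rbp−70H]` (0x109939, `l + 1`), and `d[rbp−8CH] = n8` is not read again. -/
structure Frame7 (u₀ : State) (others : List Obj) (frames : List (Nat × FrameLayout)) (len : Nat) (A : Arena)
    (stored room : Int) (ysz : Nat → Nat) (k c : Nat) (ue : State) (ret : Word) (v : State) : Prop where
  /-- the shared part of every assertion of inverse_mdct -/
  body : Body u₀ others frames len A stored room ysz k c ue ret v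
  /-- FRAME0, the buffer part: `q[rbp − 38H] = u`, `d[rbp − 44H] = n`, `q[rbp − A8H] = &u[n2]` -/
  sBuf : SlotsBuf ue v
  /-- `q[rbp − 40H] = A` (the fourth argument of both callees; segment 7b overwrites it with `R`) -/
  aSlot : v.mem.readLE (ue.reg .rsp - 72) 8 = tabA ue
  /-- `q[rbp − 88H] = 4·n2` (read at 0x109994 for `d1` and the offset `4·n2 − 16`) -/
  n2x4Slot : v.mem.readLE (ue.reg .rsp - 144) 8 = 4 * (n ue / 2)
  /-- the two slots of segment 3: `q[rbp − 98H] = 4·n2 − 32`, `q[rbp − A0H] = 4·n4` (the second is read at 0x109988 for `d0`) -/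
  sS2 : SlotsS2 ue v
  /-- `d[rbp − 60H] = ld + 1`, `d[rbp − 50H] = n2 − 1` (the loop bound; the third argument of the ld654 call) -/
  s3 : SlotsStep3 k ue v
  /-- `d[rbp − 80H] = n >> 5` (the first argument of the ld654 call) -/
  n32Slot : v.mem.readLE (ue.reg .rsp - 136) 4 = n ue / 32

/-- **After the call of imdct_step3_inner_s_loop_ld654** (`cut19`, 0x109963 `movsxd rax, DWORD PTR [rbp−7CH]`, line 2811): `Frame7`,
and `r15 = u`: the register was loaded from `q[rbp−38H]` at 0x109954 before the call, is callee-saved, and is copied to `r13` at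
0x1099b1. No other register is live: `bt`, `f`, `v`, `4·n4`, `4·n2` are re-loaded from `d[rbp−7CH]`, `q[rbp−78H]`, `q[rbp−68H]`
(the three in `Body`), `q[rbp−A0H]` (`sS2`), `q[rbp−88H]` (`n2x4Slot`). -/
structure AtCut19 (u₀ : State) (others : List Obj) (frames : List (Nat × FrameLayout)) (len : Nat) (A : Arena)
    (stored room : Int) (ysz : Nat → Nat) (k c : Nat) (ue : State) (ret : Word) (v : State) : Prop where
  /-- at the return address of the ld654 call -/
  rip : v.rip = L.inverse_mdct.cut19
  /-- the shared part of segment 7's cut points -/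
  frame : Frame7 u₀ others frames len A stored room ysz k c ue ret v
  /-- `r15 = u` (the whole register: `mov r15, QWORD PTR [rbp − 38H]`) -/
  r15 : v.reg .r15 = ue.reg .rdi

/-- `Frame7` at the entry of segment 7: `At7` has it. -/
theorem At7.frame7 {u₀ : State} {others : List Obj} {frames : List (Nat × FrameLayout)} {len : Nat} {A : Arena}
    {stored room : Int} {ysz : Nat → Nat} {k c : Nat} {ue : State} {ret : Word} {v : State}
    (h : At7 u₀ others frames len A stored room ysz k c ue ret v) :
    Frame7 u₀ others frames len A stored room ysz k c ue ret v :=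
  { body := h.body
    sBuf := h.sBuf
    aSlot := h.sA.aSlot
    n2x4Slot := h.sA.n2x4Slot
    sS2 := h.sS2
    s3 := h.s3
    n32Slot := h.n32Slot }

/-- **Segment 7a** (the second `l` loop with its inner `r` loop: imdct_step3_inner_s_loop per `(l, r)`, runs for `ld ≥ 10` only; then
the call of imdct_step3_inner_s_loop_ld654; no check site): from the head of the second `l` loop with `l = lmid k` to the state the
ld654 call returned. Inside: outer loop `loop7` with measure `ld − 6 − l`, inner loop `loop6` with measure `ebx = r`. -/
def Seg7a (Lay : Layout) (μ : Microarch) (u₀ : State) : Prop :=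
  ∀ (others : List Obj) (frames : List (Nat × FrameLayout)) (len : Nat) (A : Arena) (stored room : Int) (ysz : Nat → Nat)
    (k c : Nat) (ue : State) (ret : Word) (v : State),
    At7 u₀ others frames len A stored room ysz k c ue ret v →
    ReachVia Lay μ WayInv v (fun w => AtCut19 u₀ others frames len A stored room ysz k c ue ret w)

/-- **Segment 7b** (the load of `bit_reverse[bt]` — 1 check, 0x10997a, 8 bytes at `f + 1464 + 8·bt` —, the step-4-5-6 set-up `d0 =
&v[n4 − 4]`, `d1 = &v[n2 − 4]`, the stores to `q[rbp−50H]`, `q[rbp−58H]`, `q[rbp−40H]`, `r13 = u`, the jump to the loop head): from the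
state the ld654 call returned to the head of the step-4-5-6 loop. Straight code, 17 instructions. -/
def Seg7b (Lay : Layout) (μ : Microarch) (u₀ : State) : Prop :=
  ∀ (others : List Obj) (frames : List (Nat × FrameLayout)) (len : Nat) (A : Arena) (stored room : Int) (ysz : Nat → Nat)
    (k c : Nat) (ue : State) (ret : Word) (v : State),
    AtCut19 u₀ others frames len A stored room ysz k c ue ret v →
    ReachVia Lay μ WayInv v (fun w => At8 u₀ others frames len A stored room ysz k c ue ret w)

/-- **Segment 7 from its two parts**: 7a reaches `cut19`, 7b goes on from there to `loop8`. -/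
theorem Seg7.of_parts {Lay : Layout} {μ : Microarch} {u₀ : State} (ha : Seg7a Lay μ u₀) (hb : Seg7b Lay μ u₀) :
    Seg7 Lay μ u₀ := by
  intro others frames len A stored room ysz k c ue ret v hat
  refine (ha others frames len A stored room ysz k c ue ret v hat).trans ?_
  intro w hw
  exact hb others frames len A stored room ysz k c ue ret w hw

end inverse_mdct

end Vorbis.Spec
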